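-- pv_equiv track=rewrite | github.com/henrychen222/Leetcode | String/1297_M_MaximumNumberOccurrencesSubstring.py | maxFreq2
-- ===== SOURCE A (Python) =====
-- import collections
--
-- def maxFreq2(s: str, maxLetters: int, minSize: int, maxSize: int) -> int:
--     counts, n = collections.defaultdict(int), len(s)
--     for i in range(n):
--         for j in range(i, min(i + maxSize, n)):
--             word = s[i: j + 1]
--             if len(set(word)) > maxLetters:
--                 break
--             if len(word) >= minSize:
--                 counts[word] += 1
--     return max(counts.values(), default=0)
-- ===== SOURCE B (Python) =====
-- import collections
--
-- def maxFreq2(s: str, maxLetters: int, minSize: int, maxSize: int) -> int: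
--     # Only windows of length L = max(minSize, 1) matter: any longer valid substring's
--     # length-L prefix is at least as frequent and still valid.
--     n = len(s)
--     L = minSize if minSize >= 1 else 1
--     if L > maxSize or L > n:
--         return 0
--     windows = [s[i:i + L] for i in range(n - L + 1)]
--     good = [w for w in windows if len(set(w)) <= maxLetters]
--     counts = collections.Counter(good)
--     return max(counts.values(), default=0)
-- ===== Notes on version B (the rewrite author's own statement) =====
-- stated objective: faster
-- what changed: B replaces A's nested enumeration of every substring of length minSize..maxSize (with a per-substring set build and a dict of all of them) by a single pass over the windows of length exactly max(minSize,1) counted with a Counter: a longer valid substring's length-minSize prefix is valid and at least as frequent, so the maxima agree.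
import Mathlib
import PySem

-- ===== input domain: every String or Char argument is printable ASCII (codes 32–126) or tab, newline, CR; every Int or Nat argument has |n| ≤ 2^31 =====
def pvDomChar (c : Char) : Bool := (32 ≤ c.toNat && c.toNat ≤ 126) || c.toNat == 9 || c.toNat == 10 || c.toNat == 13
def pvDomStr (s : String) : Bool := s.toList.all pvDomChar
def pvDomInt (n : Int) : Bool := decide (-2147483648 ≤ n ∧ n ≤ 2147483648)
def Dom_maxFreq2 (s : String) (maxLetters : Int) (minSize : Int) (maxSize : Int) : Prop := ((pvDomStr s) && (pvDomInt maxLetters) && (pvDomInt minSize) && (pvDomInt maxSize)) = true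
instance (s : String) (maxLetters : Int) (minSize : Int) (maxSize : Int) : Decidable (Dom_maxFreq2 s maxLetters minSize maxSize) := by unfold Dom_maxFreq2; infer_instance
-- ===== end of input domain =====

-- B counts only windows of length max(minSize, 1) in one pass with a Counter instead of
-- A's nested enumeration of every substring of length minSize..maxSize (objective: faster).

-- ===== PORT A =====
-- inner 'for j in range(i, min(i + maxSize, n))' loop with its 'break', word = s[i:j+1]
def maxFreq2Inner (l : List Char) (maxLetters : Int) (minSize : Int) (i : Int) :
    List Int → PySem.Dict (List Char) Int → PySem.Dict (List Char) Int
  | [], counts => counts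
  | j :: js, counts =>
    let word := PySem.List.slice l (some i) (some (j + 1))
    if maxLetters < ((PySem.Set.ofList word).length : Int) then counts   -- break
    else
      let counts' := if minSize ≤ (word.length : Int) then counts.modify word 0 (· + 1) else counts
      maxFreq2Inner l maxLetters minSize i js counts'

def maxFreq2 (s : String) (maxLetters : Int) (minSize : Int) (maxSize : Int) : Int :=
  let l := s.toList
  let n : Int := (l.length : Int)
  let counts := (PySem.List.pyRange 0 n 1).foldl
    (fun counts i =>
      maxFreq2Inner l maxLetters minSize i (PySem.List.pyRange i (min (i + maxSize) n) 1) counts)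
    PySem.Dict.empty
  PySem.List.maxD counts.values (fun x => x) 0

-- ===== PORT B =====
def maxFreq2_alt (s : String) (maxLetters : Int) (minSize : Int) (maxSize : Int) : Int :=
  let l := s.toList
  let n : Int := (l.length : Int)
  let L : Int := if 1 ≤ minSize then minSize else 1
  if maxSize < L ∨ n < L then 0
  else
    let windows := (PySem.List.pyRange 0 (n - L + 1) 1).map
      (fun i => PySem.List.slice l (some i) (some (i + L)))
    let good := windows.filter (fun w => ((PySem.Set.ofList w).length : Int) ≤ maxLetters)
    let counts := PySem.Dict.counter good
    PySem.List.maxD counts.values (fun x => x) 0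

-- ===== PRECONDITION & SPEC =====
def Spec_maxFreq2 (s : String) (maxLetters : Int) (minSize : Int) (maxSize : Int) (out : Int) : Prop := out = maxFreq2_alt s maxLetters minSize maxSize
instance (s : String) (maxLetters : Int) (minSize : Int) (maxSize : Int) (out : Int) : Decidable (Spec_maxFreq2 s maxLetters minSize maxSize out) := by unfold Spec_maxFreq2; infer_instance

-- ===== CLAIM (what is proved, stated in full; the proofs are below) =====
def Claim_equal_maxFreq2 : Prop := ∀ (s : String) (maxLetters : Int) (minSize : Int) (maxSize : Int), Dom_maxFreq2 s maxLetters minSize maxSize → Spec_maxFreq2 s maxLetters minSize maxSize (maxFreq2 s maxLetters minSize maxSize)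

-- ===== LEMMAS AND PROOFS =====

-- number of distinct characters of a word, as A and B both compute it
def pvDistinct (w : List Char) : Int := ((PySem.Set.ofList w).length : Int)

-- the words the inner loop of A counts, in order
def pvWordsI (l : List Char) (maxLetters : Int) (minSize : Int) (i : Int) :
    List Int → List (List Char)
  | [] => []
  | j :: js =>
    let word := PySem.List.slice l (some i) (some (j + 1))
    if maxLetters < pvDistinct word then []
    else if minSize ≤ (word.length : Int) then word :: pvWordsI l maxLetters minSize i js
    else pvWordsI l maxLetters minSize i js

-- all words A counts, with multiplicity
def pvWA (l : List Char) (maxLetters : Int) (minSize : Int) (maxSize : Int) : List (List Char) :=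
  (PySem.List.pyRange 0 (l.length : Int) 1).flatMap
    (fun i => pvWordsI l maxLetters minSize i
      (PySem.List.pyRange i (min (i + maxSize) (l.length : Int)) 1))

-- the maximal multiplicity in a multiset of words
def pvM (W : List (List Char)) : Int := (W.map (fun w => (W.count w : Int))).foldl max 0

-- number of occurrences of w as a length-L block of l
def pvOcc (l : List Char) (L : Nat) (w : List Char) : Nat :=
  (List.range (l.length + 1)).countP
    (fun i => decide (i + L ≤ l.length ∧ (l.drop i).take L = w))

lemma pv_innerFold (l : List Char) (ml ms i : Int) (js : List Int)
    (d : PySem.Dict (List Char) Int) :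
    maxFreq2Inner l ml ms i js d
      = (pvWordsI l ml ms i js).foldl (fun d w => d.modify w 0 (· + 1)) d := by
  induction js generalizing d with
  | nil => rfl
  | cons j js ih =>
    by_cases h1 : ml < ((PySem.Set.ofList (PySem.List.slice l (some i) (some (j + 1)))).length : Int)
    · simp [maxFreq2Inner, pvWordsI, pvDistinct, h1]
    · by_cases h2 : ms ≤ ((PySem.List.slice l (some i) (some (j + 1))).length : Int)
      · simp [maxFreq2Inner, pvWordsI, pvDistinct, h1, h2, ih]
      · simp [maxFreq2Inner, pvWordsI, pvDistinct, h1, h2, ih]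

lemma pv_foldl_flatMap {α β γ : Type} (f : β → α → β) (g : γ → List α) (xs : List γ) (init : β) :
    xs.foldl (fun d i => (g i).foldl f d) init = (xs.flatMap g).foldl f init := by
  induction xs generalizing init with
  | nil => rfl
  | cons x xs ih => simp only [List.foldl_cons, List.flatMap_cons, List.foldl_append, ih]

lemma pv_maxD_id (xs : List Int) (h : ∀ x ∈ xs, 0 ≤ x) :
    PySem.List.maxD xs (fun x => x) 0 = xs.foldl max 0 := by
  cases xs with
  | nil =>
    have hn : PySem.List.max? ([] : List Int) (fun x => x) = none :=
      (PySem.List.max?_eq_none_iff _ _).2 rfl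
    simp [PySem.List.maxD, hn]
  | cons x t =>
    rw [PySem.List.maxD, PySem.List.max?_id_cons]
    have hx : max 0 x = x := max_eq_right (h x (by simp))
    simp [List.foldl_cons, hx]

lemma pv_foldl_max_le (xs : List Int) (a b : Int) (ha : a ≤ b) (h : ∀ x ∈ xs, x ≤ b) :
    xs.foldl max a ≤ b := by
  induction xs generalizing a with
  | nil => exact ha
  | cons x t ih =>
    simp only [List.foldl_cons]
    exact ih _ (max_le ha (h x (by simp))) (fun y hy => h y (by simp [hy]))

lemma pv_foldl_max_mem_iff (xs ys : List Int) (a : Int) (h : ∀ x, x ∈ xs ↔ x ∈ ys) :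
    xs.foldl max a = ys.foldl max a := by
  have key : ∀ (us vs : List Int), (∀ x ∈ us, x ∈ vs) → us.foldl max a ≤ vs.foldl max a := by
    intro us vs hsub
    rcases PySem.List.foldl_max_mem us a with heq | hmem
    · rw [heq]; exact (PySem.List.le_foldl_max vs a).1
    · exact (PySem.List.le_foldl_max vs a).2 _ (hsub _ hmem)
  exact le_antisymm (key xs ys (fun x hx => (h x).1 hx)) (key ys xs (fun x hx => (h x).2 hx))

-- max(counter(W).values(), default=0) is the maximal multiplicity
lemma pv_maxD_counter (W : List (List Char)) :
    PySem.List.maxD (PySem.Dict.counter W).values (fun x => x) 0 = pvM W := by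
  have hv : (PySem.Dict.counter W).values
      = (PySem.Set.ofList W).map (fun k => ((W.count k : Nat) : Int)) := by
    have h0 : (PySem.Dict.counter W).values = ((PySem.Dict.counter W).items).map Prod.snd := rfl
    rw [h0, PySem.Dict.items_counter, List.map_map]
    rfl
  rw [hv, pv_maxD_id _ (by
    intro x hx
    rcases List.mem_map.1 hx with ⟨k, _, rfl⟩
    exact Int.natCast_nonneg _)]
  unfold pvM
  apply pv_foldl_max_mem_iff
  intro x
  constructor
  · intro hx
    rcases List.mem_map.1 hx with ⟨k, hk, rfl⟩
    exact List.mem_map.2 ⟨k, (PySem.Set.mem_ofList W k).1 hk, rfl⟩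
  · intro hx
    rcases List.mem_map.1 hx with ⟨k, hk, rfl⟩
    exact List.mem_map.2 ⟨k, (PySem.Set.mem_ofList W k).2 hk, rfl⟩

lemma pv_takeWhile_eq_filter {α : Type} (p : α → Bool) (xs : List α)
    (h : xs.Pairwise (fun a b => p b = true → p a = true)) :
    xs.takeWhile p = xs.filter p := by
  induction xs with
  | nil => rfl
  | cons x t ih =>
    rcases List.pairwise_cons.1 h with ⟨hx, ht⟩
    cases hp : p x with
    | true => simp [hp, ih ht]
    | false =>
      have hnil : List.filter p t = [] := List.filter_eq_nil_iff.2 (fun y hy hpy => by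
        have := hx y hy hpy; simp [hp] at this)
      simp [hp, hnil]

lemma pv_distinct_mono (u v : List Char) (h : u.Sublist v) : pvDistinct u ≤ pvDistinct v := by
  have card : ∀ (w : List Char), (PySem.Set.ofList w).length = w.toFinset.card := by
    intro w
    rw [← List.toFinset_card_of_nodup (PySem.Set.nodup_ofList w)]
    congr 1
    ext c
    simp [List.mem_toFinset, PySem.Set.mem_ofList]
  unfold pvDistinct
  rw [card, card]
  exact_mod_cast Finset.card_le_card (fun c hc => by
    simp only [List.mem_toFinset] at *
    exact h.subset hc)

lemma pv_pyRange_one_map (a b : Int) :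
    PySem.List.pyRange a b 1 = (List.range (b - a).toNat).map (fun k : Nat => a + (k : Int)) := by
  simp only [PySem.List.pyRange]
  rw [if_neg (by norm_num : (1:Int) ≠ 0), if_pos (by norm_num : (0:Int) < 1)]
  split_ifs with h
  · have hc : (b - a + 1 - 1) / 1 = b - a := by omega
    rw [hc]
    exact List.map_congr_left (fun k _ => by ring)
  · have h0 : (b - a).toNat = 0 := by omega
    rw [h0]
    rfl

lemma pv_wordsI_generic (l : List Char) (ml ms i : Int) (js : List Int) :
    pvWordsI l ml ms i js
      = ((js.map (fun j => PySem.List.slice l (some i) (some (j + 1)))).takeWhile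
          (fun w => decide (pvDistinct w ≤ ml))).filter
        (fun w => decide (ms ≤ (w.length : Int))) := by
  induction js with
  | nil => rfl
  | cons j js ih =>
    by_cases h1 : ml < pvDistinct (PySem.List.slice l (some i) (some (j + 1)))
    · simp [pvWordsI, h1, not_le.2 h1]
    · by_cases h2 : ms ≤ ((PySem.List.slice l (some i) (some (j + 1))).length : Int)
      · simp [pvWordsI, h1, not_lt.1 h1, h2, ih]
      · simp [pvWordsI, h1, not_lt.1 h1, h2, ih]

-- the words A's inner loop counts for start index iN, as a filtered list of prefixes
lemma pv_wordsI_eq (l : List Char) (ml ms MS : Int) (iN : Nat) :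
    pvWordsI l ml ms (iN : Int)
        (PySem.List.pyRange (iN : Int) (min ((iN : Int) + MS) (l.length : Int)) 1)
      = (((List.range (min ((iN : Int) + MS) (l.length : Int) - (iN : Int)).toNat).map
            (fun k => (l.drop iN).take (k + 1))).filter
          (fun w => decide (pvDistinct w ≤ ml ∧ ms ≤ (w.length : Int)))) := by
  rw [pv_wordsI_generic, pv_pyRange_one_map, List.map_map]
  have hmap : (fun j => PySem.List.slice l (some ((iN : Int))) (some (j + 1)))
        ∘ (fun k : Nat => (iN : Int) + (k : Int))
      = fun k : Nat => (l.drop iN).take (k + 1) := by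
    funext k
    show PySem.List.slice l (some (iN : Int)) (some ((iN : Int) + (k : Int) + 1)) = _
    have hcast : ((iN : Int) + (k : Int) + 1) = (iN : Int) + ((k + 1 : Nat) : Int) := by
      push_cast; ring
    rw [hcast, PySem.List.slice_natCast_add]
  rw [hmap]
  rw [pv_takeWhile_eq_filter _ _ (by
    rw [List.pairwise_map]
    apply List.pairwise_lt_range.imp_of_mem
    intro a b ha hb hab hd
    simp only [decide_eq_true_eq] at *
    refine le_trans (pv_distinct_mono _ _ ?_) hd
    have htt : (l.drop iN).take (a + 1) = ((l.drop iN).take (b + 1)).take (a + 1) := by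
      rw [List.take_take]
      congr 1
      omega
    rw [htt]
    exact List.take_sublist _ _)]
  rw [List.filter_filter]
  apply List.filter_congr
  intro w _
  rw [Bool.eq_iff_iff]
  simp only [Bool.and_eq_true, decide_eq_true_eq]
  tauto

-- multiplicity of w among the words counted for start index iN
lemma pv_wordsI_count (l : List Char) (ml ms MS : Int) (iN : Nat) (hi : iN ≤ l.length)
    (w : List Char) :
    (pvWordsI l ml ms (iN : Int)
        (PySem.List.pyRange (iN : Int) (min ((iN : Int) + MS) (l.length : Int)) 1)).count w
      = if pvDistinct w ≤ ml ∧ ms ≤ (w.length : Int) ∧ 1 ≤ w.length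
           ∧ (w.length : Int) ≤ MS ∧ iN + w.length ≤ l.length
           ∧ (l.drop iN).take w.length = w
        then 1 else 0 := by
  rw [pv_wordsI_eq]
  set K := (min ((iN : Int) + MS) (l.length : Int) - (iN : Int)).toNat with hK
  have hKle : K ≤ l.length - iN := by omega
  have hlen : ∀ k, k < K → ((l.drop iN).take (k + 1)).length = k + 1 := by
    intro k hk
    rw [List.length_take, List.length_drop]
    omega
  have hnd : ((List.range K).map (fun k => (l.drop iN).take (k + 1))).Nodup := by
    apply List.Nodup.map_on _ List.nodup_range
    intro a ha b hb hab
    have hab' : a + 1 = b + 1 := by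
      rw [← hlen a (List.mem_range.1 ha), ← hlen b (List.mem_range.1 hb), hab]
    omega
  have hndf := hnd.filter (fun w => decide (pvDistinct w ≤ ml ∧ ms ≤ (w.length : Int)))
  have hmem : w ∈ ((List.range K).map (fun k => (l.drop iN).take (k + 1))).filter
        (fun w => decide (pvDistinct w ≤ ml ∧ ms ≤ (w.length : Int)))
      ↔ (pvDistinct w ≤ ml ∧ ms ≤ (w.length : Int) ∧ 1 ≤ w.length
           ∧ (w.length : Int) ≤ MS ∧ iN + w.length ≤ l.length
           ∧ (l.drop iN).take w.length = w) := by
    rw [List.mem_filter]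
    simp only [List.mem_map, List.mem_range, decide_eq_true_eq]
    constructor
    · rintro ⟨⟨k, hk, rfl⟩, hd, hm⟩
      have hl := hlen k hk
      refine ⟨hd, hm, by omega, by rw [hl]; push_cast; omega, by rw [hl]; omega, by rw [hl]⟩
    · rintro ⟨hd, hm, h1, hMS, hn, hw⟩
      refine ⟨⟨w.length - 1, by omega, ?_⟩, hd, hm⟩
      have h11 : w.length - 1 + 1 = w.length := by omega
      rw [h11, hw]
  by_cases hc : pvDistinct w ≤ ml ∧ ms ≤ (w.length : Int) ∧ 1 ≤ w.length
      ∧ (w.length : Int) ≤ MS ∧ iN + w.length ≤ l.length ∧ (l.drop iN).take w.length = w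
  · rw [if_pos hc]
    exact List.count_eq_one_of_mem hndf (hmem.2 hc)
  · rw [if_neg hc]
    exact List.count_eq_zero.2 (fun hmm => hc (hmem.1 hmm))

-- total multiplicity of w in everything A counts
lemma pv_WA_count (l : List Char) (ml ms MS : Int) (w : List Char) :
    (pvWA l ml ms MS).count w
      = if pvDistinct w ≤ ml ∧ ms ≤ (w.length : Int) ∧ 1 ≤ w.length ∧ (w.length : Int) ≤ MS
        then pvOcc l w.length w else 0 := by
  unfold pvWA
  rw [List.count_flatMap, PySem.List.pyRange_zero_natCast, List.map_map]
  have hterm : ∀ iN ∈ List.range l.length,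
      ((List.count w ∘ fun i => pvWordsI l ml ms i
          (PySem.List.pyRange i (min (i + MS) (l.length : Int)) 1)) ∘ fun k : Nat => (k : Int)) iN
        = if pvDistinct w ≤ ml ∧ ms ≤ (w.length : Int) ∧ 1 ≤ w.length
             ∧ (w.length : Int) ≤ MS ∧ iN + w.length ≤ l.length
             ∧ (l.drop iN).take w.length = w
          then 1 else 0 := by
    intro iN hiN
    exact pv_wordsI_count l ml ms MS iN (le_of_lt (List.mem_range.1 hiN)) w
  rw [List.map_congr_left hterm]
  by_cases hc : pvDistinct w ≤ ml ∧ ms ≤ (w.length : Int) ∧ 1 ≤ w.length ∧ (w.length : Int) ≤ MS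
  · rw [if_pos hc]
    have hiff : ∀ iN : Nat, (pvDistinct w ≤ ml ∧ ms ≤ (w.length : Int) ∧ 1 ≤ w.length
             ∧ (w.length : Int) ≤ MS ∧ iN + w.length ≤ l.length
             ∧ (l.drop iN).take w.length = w)
        ↔ (iN + w.length ≤ l.length ∧ (l.drop iN).take w.length = w) := by
      intro iN; constructor
      · rintro ⟨_, _, _, _, h5, h6⟩; exact ⟨h5, h6⟩
      · rintro ⟨h5, h6⟩; exact ⟨hc.1, hc.2.1, hc.2.2.1, hc.2.2.2, h5, h6⟩
    simp only [hiff]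
    rw [PySem.List.sum_map_ite_one_zero_nat'
      (fun iN => iN + w.length ≤ l.length ∧ (l.drop iN).take w.length = w)]
    unfold pvOcc
    rw [List.range_succ, List.countP_append]
    have h0 : List.countP
        (fun i => decide (i + w.length ≤ l.length ∧ (l.drop i).take w.length = w)) [l.length]
        = 0 := by
      have hw1 : 1 ≤ w.length := hc.2.2.1
      simp only [List.countP_cons, List.countP_nil]
      simp
      intro h
      subst h
      simp at hw1
    omega
  · rw [if_neg hc]
    apply List.sum_eq_zero
    intro x hx
    rcases List.mem_map.1 hx with ⟨iN, _, rfl⟩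
    rw [if_neg]
    rintro ⟨h1, h2, h3, h4, _⟩
    exact hc ⟨h1, h2, h3, h4⟩

lemma pv_M_le (W1 W2 : List (List Char))
    (h : ∀ w ∈ W1, ∃ p ∈ W2, W1.count w ≤ W2.count p) : pvM W1 ≤ pvM W2 := by
  unfold pvM
  apply pv_foldl_max_le
  · exact (PySem.List.le_foldl_max _ _).1
  · intro x hx
    rcases List.mem_map.1 hx with ⟨w, hw, rfl⟩
    obtain ⟨p, hp, hcnt⟩ := h w hw
    calc (W1.count w : Int) ≤ (W2.count p : Int) := by exact_mod_cast hcnt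
      _ ≤ _ := (PySem.List.le_foldl_max _ _).2 _ (List.mem_map.2 ⟨p, hp, rfl⟩)

-- A's result is the maximal multiplicity among all the words it counts
lemma pv_A_eq (s : String) (ml ms MS : Int) :
    maxFreq2 s ml ms MS = pvM (pvWA s.toList ml ms MS) := by
  unfold maxFreq2
  simp only [pv_innerFold]
  rw [pv_foldl_flatMap, ← PySem.Dict.counter_eq_foldl, pv_maxD_counter]
  rfl

-- multiplicity of a valid word among B's filtered windows is its occurrence count
lemma pv_good_count (l : List Char) (ml : Int) (LN : Nat) (hn : LN ≤ l.length)
    (w : List Char) (hwd : ((PySem.Set.ofList w).length : Int) ≤ ml) :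
    (((List.range (l.length - LN + 1)).map (fun i => (l.drop i).take LN)).filter
        (fun u => decide (((PySem.Set.ofList u).length : Int) ≤ ml))).count w
      = pvOcc l LN w := by
  rw [List.count_filter (by simp [hwd])]
  rw [List.count_eq_countP, List.countP_map]
  unfold pvOcc
  have hsplit : l.length + 1 = (l.length - LN + 1) + (l.length - (l.length - LN)) := by omega
  conv_rhs => rw [hsplit, List.range_add]
  rw [List.countP_append]
  have h2 : List.countP (fun i => decide (i + LN ≤ l.length ∧ (l.drop i).take LN = w))
      ((List.range (l.length - (l.length - LN))).map (fun x => l.length - LN + 1 + x)) = 0 := by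
    rw [List.countP_eq_zero]
    intro a ha
    rcases List.mem_map.1 ha with ⟨x, hx, rfl⟩
    simp only [decide_eq_true_eq]
    rintro ⟨h5, _⟩
    omega
  rw [h2, Nat.add_zero]
  apply List.countP_congr
  intro i hi
  have hi' := List.mem_range.1 hi
  have hle : i + LN ≤ l.length := by omega
  simp only [Function.comp_apply]
  rw [Bool.eq_iff_iff, beq_iff_eq, decide_eq_true_eq]
  tauto

-- when maxSize < max(minSize,1) or len(s) < max(minSize,1), A counts nothing
lemma pv_WA_nil (l : List Char) (ml ms MS L : Int) (hLdef : L = if 1 ≤ ms then ms else 1)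
    (hearly : MS < L ∨ (l.length : Int) < L) : pvWA l ml ms MS = [] := by
  rw [List.eq_nil_iff_forall_not_mem]
  intro w hw
  have hpos : 0 < (pvWA l ml ms MS).count w := List.count_pos_iff.2 hw
  rw [pv_WA_count] at hpos
  split at hpos
  · rename_i hc
    obtain ⟨h1, h2, h3, h4⟩ := hc
    obtain ⟨i, _, hdec⟩ := List.countP_pos_iff.1 hpos
    simp only [decide_eq_true_eq] at hdec
    have h5 := hdec.1
    have hL : L ≤ (w.length : Int) := by
      rw [hLdef]
      split_ifs <;> omega
    rcases hearly with h | h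
    · omega
    · omega
  · omega

-- ===== VERDICT (by name: the statement is the Claim_ definition above) =====
theorem maxFreq2_spec : Claim_equal_maxFreq2 := by
  intro s ml ms MS _
  unfold Spec_maxFreq2
  rw [pv_A_eq]
  unfold maxFreq2_alt
  simp only []
  by_cases hearly : MS < (if 1 ≤ ms then ms else 1) ∨ ((s.toList.length : Int)) < (if 1 ≤ ms then ms else 1)
  · rw [if_pos hearly, pv_WA_nil s.toList ml ms MS _ rfl hearly]
    rfl
  · rw [if_neg hearly]
    push Not at hearly
    obtain ⟨hLM, hLn⟩ := hearly
    set l := s.toList with hl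
    set L : Int := if 1 ≤ ms then ms else 1 with hLdef
    have hL1 : 1 ≤ L := by rw [hLdef]; split_ifs <;> omega
    have hmsL : ms ≤ L := by rw [hLdef]; split_ifs <;> omega
    set LN : Nat := L.toNat with hLNdef
    have hLcast : (LN : Int) = L := by omega
    have hLN1 : 1 ≤ LN := by omega
    have hLNn : LN ≤ l.length := by omega
    have hrange : (l.length : Int) - L + 1 = ((l.length - LN + 1 : Nat) : Int) := by
      push_cast; omega
    rw [hrange, PySem.List.pyRange_zero_natCast, List.map_map]
    have hcomp : (fun i => PySem.List.slice l (some i) (some (i + L)))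
        ∘ (fun k : Nat => (k : Int)) = fun k : Nat => (l.drop k).take LN := by
      funext k
      show PySem.List.slice l (some (k : Int)) (some ((k : Int) + L)) = _
      rw [← hLcast, PySem.List.slice_natCast_add]
    rw [hcomp, pv_maxD_counter]
    -- both sides are maximal multiplicities; compare them both ways
    have hglen : ∀ w ∈ ((List.range (l.length - LN + 1)).map
          (fun i => (l.drop i).take LN)).filter
          (fun u => decide (((PySem.Set.ofList u).length : Int) ≤ ml)),
        w.length = LN ∧ ((PySem.Set.ofList w).length : Int) ≤ ml := by
      intro w hwmem
      rcases List.mem_filter.1 hwmem with ⟨hwin, hdec⟩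
      rcases List.mem_map.1 hwin with ⟨i, hir, rfl⟩
      have hir' := List.mem_range.1 hir
      refine ⟨?_, by simpa using hdec⟩
      rw [List.length_take, List.length_drop]
      omega
    apply le_antisymm
    · -- A ≤ B : each counted word's length-LN prefix is at least as frequent
      apply pv_M_le
      intro w hw
      have hwpos : 0 < (pvWA l ml ms MS).count w := List.count_pos_iff.2 hw
      rw [pv_WA_count] at hwpos ⊢
      split at hwpos
      · rename_i hc
        obtain ⟨h1, h2, h3, h4⟩ := hc
        rw [if_pos ⟨h1, h2, h3, h4⟩]
        have hLNw : LN ≤ w.length := by omega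
        set p := w.take LN with hpdef
        have hpd : ((PySem.Set.ofList p).length : Int) ≤ ml :=
          le_trans (pv_distinct_mono _ _ (List.take_sublist _ _)) h1
        have hple : pvOcc l w.length w ≤ pvOcc l LN p := by
          unfold pvOcc
          apply List.countP_mono_left
          intro i _ hdec
          simp only [decide_eq_true_eq] at hdec ⊢
          refine ⟨by omega, ?_⟩
          rw [hpdef, ← hdec.2, List.take_take]
          congr 1
          omega
        have hpcnt := pv_good_count l ml LN hLNn p hpd
        refine ⟨p, ?_, ?_⟩
        · rw [← List.count_pos_iff, hpcnt]
          omega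
        · rw [hpcnt]
          exact hple
      · omega
    · -- B ≤ A : each window is itself one of A's counted words, equally frequent
      apply pv_M_le
      intro w hw
      obtain ⟨hwlen, hwd⟩ := hglen w hw
      have hwcnt := pv_good_count l ml LN hLNn w hwd
      have hwpos : 0 < pvOcc l LN w := by
        rw [← hwcnt]
        exact List.count_pos_iff.2 hw
      have hcnta : (pvWA l ml ms MS).count w = pvOcc l LN w := by
        rw [pv_WA_count, if_pos ⟨hwd, by rw [hwlen]; omega, by omega, by rw [hwlen]; omega⟩, hwlen]
      refine ⟨w, ?_, ?_⟩
      · rw [← List.count_pos_iff, hcnta]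
        exact hwpos
      · rw [hwcnt, hcnta]
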